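-- pv_equiv track=rewrite | github.com/scikit-hep/formulate | src/formulate/AST.py | _is_parenthesized_expression
-- ===== SOURCE A (Python) =====
-- def _is_parenthesized_expression(expr_str):
--     """
--     Check if the expression string is already properly parenthesized.
--     """
--     if not (expr_str.startswith("(") and expr_str.endswith(")")):
--         return False
--
--     # Count opening and closing parentheses
--     open_count = 0
--     for i, char in enumerate(expr_str):
--         if char == "(":
--             open_count += 1
--         elif char == ")":
--             open_count -= 1
--             # If we reach 0 before the end, it's not fully parenthesized
--             if open_count == 0 and i < len(expr_str) - 1:
--                 return False
--
--     return True
-- ===== SOURCE B (Python) =====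
-- def _is_parenthesized_expression(expr_str):
--     """
--     Check if the expression string is already properly parenthesized.
--     """
--     if not (expr_str.startswith("(") and expr_str.endswith(")")):
--         return False
--
--     # Take the parenthesis skeleton of the inner slice and reduce it to normal
--     # form by repeatedly deleting "()" pairs.  The normal form is ")"*a + "("*b;
--     # the outer pair wraps the whole expression exactly when no ")" survives
--     # (an unmatched ")" inside is what would close the outer "(" early).
--     skeleton = "".join(c for c in expr_str[1:-1] if c in "()")
--     while "()" in skeleton:
--         skeleton = skeleton.replace("()", "")
--     return ")" not in skeleton
-- ===== Notes on version B (the rewrite author's own statement) =====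
-- stated objective: alternative
-- what changed: After the start/end guard, B extracts the parenthesis skeleton of the inner slice and reduces it to normal form by repeatedly deleting "()" pairs (string rewriting), accepting iff no ")" survives; A's depth counter is gone entirely.
import Mathlib
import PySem

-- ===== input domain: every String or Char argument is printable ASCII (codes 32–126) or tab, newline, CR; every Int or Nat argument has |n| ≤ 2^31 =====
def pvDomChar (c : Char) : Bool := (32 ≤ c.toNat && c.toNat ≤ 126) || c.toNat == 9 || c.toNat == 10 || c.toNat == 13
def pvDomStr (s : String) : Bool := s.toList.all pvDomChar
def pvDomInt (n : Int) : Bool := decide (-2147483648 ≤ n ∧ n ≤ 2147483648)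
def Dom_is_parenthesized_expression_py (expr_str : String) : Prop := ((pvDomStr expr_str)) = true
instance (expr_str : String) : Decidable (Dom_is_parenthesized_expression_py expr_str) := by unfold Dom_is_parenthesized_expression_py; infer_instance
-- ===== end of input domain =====

-- B replaces A's depth-counting loop by string rewriting: it reduces the parenthesis
-- skeleton of the inner slice to normal form by repeatedly deleting "()" pairs and
-- accepts iff no ')' survives; same result, a different algorithm (alternative).

-- ===== PORT A =====
-- the enumerate loop with early return, as structural recursion over the characters
def pvGoA : List Char → Int → Int → Int → Bool
  | [], _, _, _ => true
  | c :: rest, i, n, oc =>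
    if c = '(' then pvGoA rest (i + 1) n (oc + 1)
    else if c = ')' then
      if oc - 1 = 0 ∧ i < n - 1 then false
      else pvGoA rest (i + 1) n (oc - 1)
    else pvGoA rest (i + 1) n oc

def is_parenthesized_expression_py (expr_str : String) : Bool :=
  if !(PySem.Str.startswith expr_str "(" && PySem.Str.endswith expr_str ")") then false
  else pvGoA expr_str.toList 0 (PySem.Str.len expr_str) 0

-- ===== PORT B =====
-- one left-to-right replace pass: skeleton.replace("()", "")
def pvRmPairs : List Char → List Char
  | [] => []
  | [c] => [c]
  | c1 :: c2 :: rest =>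
    if c1 = '(' ∧ c2 = ')' then pvRmPairs rest else c1 :: pvRmPairs (c2 :: rest)

-- the membership test: "()" in skeleton
def pvHasPair : List Char → Bool
  | [] => false
  | [_] => false
  | c1 :: c2 :: rest => if c1 = '(' ∧ c2 = ')' then true else pvHasPair (c2 :: rest)

theorem pvRmPairs_len : ∀ t : List Char,
    (pvRmPairs t).length ≤ t.length ∧ (pvHasPair t = true → (pvRmPairs t).length < t.length) := by
  intro t
  induction t using pvRmPairs.induct with
  | case1 => simp [pvRmPairs, pvHasPair]
  | case2 c => simp [pvRmPairs, pvHasPair]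
  | case3 c1 c2 rest h ih =>
    rw [pvRmPairs, if_pos h, pvHasPair, if_pos h]
    exact ⟨by simpa using Nat.le_succ_of_le (Nat.le_succ_of_le ih.1), fun _ => by
      simp only [List.length_cons]; omega⟩
  | case4 c1 c2 rest h ih =>
    rw [pvRmPairs, if_neg h, pvHasPair, if_neg h]
    simp only [List.length_cons] at *
    exact ⟨by omega, fun hp => by have := ih.2 hp; omega⟩

-- the while loop: reduce to normal form
def pvReduce (t : List Char) : List Char :=
  if h : pvHasPair t = true then pvReduce (pvRmPairs t) else t
  termination_by t.length
  decreasing_by exact (pvRmPairs_len t).2 h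

def is_parenthesized_expression_py_alt (expr_str : String) : Bool :=
  if !(PySem.Str.startswith expr_str "(" && PySem.Str.endswith expr_str ")") then false
  else
    -- skeleton = "".join(c for c in expr_str[1:-1] if c in "()"), reduced by the while
    -- loop pvReduce; result: ")" not in skeleton
    !((pvReduce ((PySem.List.slice expr_str.toList (some 1) (some (-1))).filter
        (fun c => c == '(' || c == ')'))).contains ')')

-- ===== PRECONDITION & SPEC =====
def Spec_is_parenthesized_expression_py (expr_str : String) (out : Bool) : Prop := out = is_parenthesized_expression_py_alt expr_str
instance (expr_str : String) (out : Bool) : Decidable (Spec_is_parenthesized_expression_py expr_str out) := by unfold Spec_is_parenthesized_expression_py; infer_instance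

-- ===== CLAIM (what is proved, stated in full; the proofs are below) =====
def Claim_equal_is_parenthesized_expression_py : Prop := ∀ (expr_str : String), Dom_is_parenthesized_expression_py expr_str → Spec_is_parenthesized_expression_py expr_str (is_parenthesized_expression_py expr_str)

-- ===== LEMMAS AND PROOFS =====

-- the step of a character, and "every prefix depth stays nonnegative"
def pvValC (c : Char) : Int := if c = '(' then 1 else if c = ')' then -1 else 0

def pvNonneg : List Char → Int → Bool
  | [], _ => true
  | c :: r, d => (decide (0 ≤ d + pvValC c)) && pvNonneg r (d + pvValC c)

theorem pvValC_bounds (c : Char) : -1 ≤ pvValC c ∧ pvValC c ≤ 1 := by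
  unfold pvValC; split_ifs <;> omega

-- B-side, step 1: one replace pass preserves prefix-nonnegativity
theorem pvRmPairs_nonneg : ∀ (t : List Char) (d : Int), 0 ≤ d →
    pvNonneg (pvRmPairs t) d = pvNonneg t d := by
  intro t
  induction t using pvRmPairs.induct with
  | case1 => intro d _; rfl
  | case2 c => intro d _; rfl
  | case3 c1 c2 rest h ih =>
    intro d hd
    obtain ⟨h1, h2⟩ := h
    rw [pvRmPairs, if_pos ⟨h1, h2⟩, ih d hd]
    subst h1; subst h2
    rw [show pvNonneg ('(' :: ')' :: rest) d =
        (decide (0 ≤ d + pvValC '(') && (decide (0 ≤ d + pvValC '(' + pvValC ')') &&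
          pvNonneg rest (d + pvValC '(' + pvValC ')'))) from rfl]
    rw [show pvValC '(' = 1 from rfl, show pvValC ')' = -1 from rfl,
      show d + 1 + -1 = d from by ring,
      decide_eq_true (show (0 ≤ d + 1) from by omega),
      decide_eq_true hd]
    simp
  | case4 c1 c2 rest h ih =>
    intro d hd
    rw [pvRmPairs, if_neg h]
    rw [show pvNonneg (c1 :: pvRmPairs (c2 :: rest)) d =
        (decide (0 ≤ d + pvValC c1) && pvNonneg (pvRmPairs (c2 :: rest)) (d + pvValC c1)) from rfl,
      show pvNonneg (c1 :: c2 :: rest) d =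
        (decide (0 ≤ d + pvValC c1) && pvNonneg (c2 :: rest) (d + pvValC c1)) from rfl]
    by_cases hv : 0 ≤ d + pvValC c1
    · rw [ih (d + pvValC c1) hv]
    · rw [decide_eq_false hv]
      simp

theorem pvRmPairs_subset : ∀ (t : List Char) (c : Char), c ∈ pvRmPairs t → c ∈ t := by
  intro t
  induction t using pvRmPairs.induct with
  | case1 => intro c h; exact absurd h (by simp [pvRmPairs])
  | case2 _ => intro c h; rw [pvRmPairs] at h; exact h
  | case3 c1 c2 rest h ih =>
    intro c hc
    rw [pvRmPairs, if_pos h] at hc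
    simp only [List.mem_cons]
    exact Or.inr (Or.inr (ih c hc))
  | case4 c1 c2 rest h ih =>
    intro c hc
    rw [pvRmPairs, if_neg h] at hc
    rcases List.mem_cons.mp hc with h' | h'
    · simp [h']
    · simp only [List.mem_cons]
      rcases List.mem_cons.mp (ih c h') with h'' | h''
      · exact Or.inr (Or.inl h'')
      · exact Or.inr (Or.inr h'')

-- B-side, step 2: at a fixpoint, a string over '(' ')' with no ')' at its head
theorem pvNoClose_nonneg : ∀ (t : List Char) (d : Int), 0 ≤ d → t.contains ')' = false →
    pvNonneg t d = true := by
  intro t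
  induction t with
  | nil => intro d _ _; rfl
  | cons c r ih =>
    intro d hd hc
    simp only [List.contains_cons, Bool.or_eq_false_iff, beq_eq_false_iff_ne] at hc
    have hv : 0 ≤ pvValC c := by
      unfold pvValC
      split_ifs with h1 h2
      · omega
      · exact absurd h2.symm hc.1
      · omega
    simp only [pvNonneg, Bool.and_eq_true, decide_eq_true_iff]
    exact ⟨by omega, ih (d + pvValC c) (by omega) hc.2⟩

theorem pvFix_head : ∀ (t : List Char), (∀ c ∈ t, c = '(' ∨ c = ')') →
    pvHasPair t = false → t.contains ')' = true → t.head? = some ')' := by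
  intro t
  induction t with
  | nil => intro _ _ h; simp at h
  | cons c r ih =>
    intro hpo hnp hc
    by_cases hcc : c = ')'
    · simp [hcc]
    · have hco : c = '(' := (hpo c (by simp)).resolve_right hcc
      have hcr : r.contains ')' = true := by
        simp only [List.contains_cons] at hc
        rcases Bool.or_eq_true_iff.mp hc with h | h
        · exact absurd (Eq.symm (by simpa using h)) hcc
        · exact h
      cases r with
      | nil => simp at hcr
      | cons c2 rest =>
        rw [pvHasPair] at hnp
        by_cases hp : c = '(' ∧ c2 = ')'
        · rw [if_pos hp] at hnp; exact absurd hnp (by simp)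
        · rw [if_neg hp] at hnp
          have := ih (fun x hx => hpo x (by simp [hx])) hnp hcr
          simp only [List.head?_cons, Option.some.injEq] at this
          exact absurd ⟨hco, this⟩ hp

theorem pvFix_eq : ∀ (t : List Char), (∀ c ∈ t, c = '(' ∨ c = ')') →
    pvHasPair t = false → (!(t.contains ')')) = pvNonneg t 0 := by
  intro t hpo hnp
  cases hc : t.contains ')' with
  | false => rw [pvNoClose_nonneg t 0 (le_refl 0) hc]; rfl
  | true =>
    have hh := pvFix_head t hpo hnp hc
    cases t with
    | nil => simp at hh
    | cons c r =>
      simp only [List.head?_cons, Option.some.injEq] at hh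
      subst hh
      simp [pvNonneg, pvValC]

-- B-side, step 3: the while loop computes prefix-nonnegativity
theorem pvReduce_spec : ∀ (t : List Char), (∀ c ∈ t, c = '(' ∨ c = ')') →
    (!((pvReduce t).contains ')')) = pvNonneg t 0 := by
  intro t
  induction t using pvReduce.induct with
  | case1 t h ih =>
    intro hpo
    rw [pvReduce, dif_pos h]
    have hpo' : ∀ c ∈ pvRmPairs t, c = '(' ∨ c = ')' :=
      fun c hc => hpo c (pvRmPairs_subset t c hc)
    rw [ih hpo', pvRmPairs_nonneg t 0 (le_refl 0)]
  | case2 t h =>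
    intro hpo
    rw [pvReduce, dif_neg h]
    exact pvFix_eq t hpo (by simpa using h)

-- A-side: the running-depth view of the loop (as in the transliteration)
def pvDepths : List Char → Int → List Int
  | [], _ => []
  | c :: rest, d =>
    let d' := d + (if c = '(' then 1 else 0) - (if c = ')' then 1 else 0)
    d' :: pvDepths rest d'

theorem pvDepths_cons (c : Char) (rest : List Char) (d : Int) :
    pvDepths (c :: rest) d = (d + pvValC c) :: pvDepths rest (d + pvValC c) := by
  simp only [pvDepths, pvValC]
  by_cases h1 : c = '(' <;> by_cases h2 : c = ')' <;> simp_all <;> ring_nf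
  <;> norm_num

theorem pvDepths_length (cs : List Char) (d : Int) : (pvDepths cs d).length = cs.length := by
  induction cs generalizing d with
  | nil => rfl
  | cons c rest ih => simp [pvDepths, ih]

theorem pvDepths_ne_nil {c : Char} (rest : List Char) (d : Int) :
    pvDepths (c :: rest) d ≠ [] := by
  intro h
  have := pvDepths_length (c :: rest) d
  rw [h] at this
  simp at this

theorem pvGoA_open {c : Char} (rest : List Char) (i n oc : Int) (h : c = '(') :
    pvGoA (c :: rest) i n oc = pvGoA rest (i + 1) n (oc + 1) := by
  simp only [pvGoA]; rw [if_pos h]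

theorem pvGoA_close {c : Char} (rest : List Char) (i n oc : Int) (h : c = ')') :
    pvGoA (c :: rest) i n oc =
      if oc - 1 = 0 ∧ i < n - 1 then false else pvGoA rest (i + 1) n (oc - 1) := by
  simp only [pvGoA]; rw [if_neg (by simp [h]), if_pos h]

theorem pvGoA_other {c : Char} (rest : List Char) (i n oc : Int)
    (h1 : c ≠ '(') (h2 : c ≠ ')') :
    pvGoA (c :: rest) i n oc = pvGoA rest (i + 1) n oc := by
  simp only [pvGoA]; rw [if_neg h1, if_neg h2]

-- A's loop returns true exactly when every depth of the table except the last is nonzero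
theorem pvGo_eq (cs : List Char) : ∀ (i n d : Int), i + cs.length = n → 0 < d →
    pvGoA cs i n d = ((pvDepths cs d).dropLast.all (fun x => x != 0)) := by
  induction cs with
  | nil => intro i n d _ _; rfl
  | cons c rest ih =>
    intro i n d hn hd
    have hn' : i + (rest.length : Int) + 1 = n := by
      simp only [List.length_cons] at hn; push_cast at hn ⊢; omega
    by_cases hc : c = '('
    · rw [pvGoA_open rest i n d hc]
      subst hc
      rw [pvDepths_cons]
      have hv : pvValC '(' = 1 := rfl
      rw [hv]
      cases rest with
      | nil => rfl
      | cons r rs =>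
        rw [List.dropLast_cons_of_ne_nil (pvDepths_ne_nil rs (d + 1))]
        rw [ih (i + 1) n (d + 1) (by simp only [List.length_cons] at hn' ⊢; push_cast at hn' ⊢; omega) (by omega)]
        simp only [List.all_cons]
        rw [show ((d + 1 : Int) != 0) = true from by simp; omega, Bool.true_and]
    · by_cases hc2 : c = ')'
      · rw [pvGoA_close rest i n d hc2]
        subst hc2
        rw [pvDepths_cons]
        have hv : pvValC ')' = -1 := rfl
        rw [hv]
        have hd1 : d + -1 = d - 1 := by ring
        rw [hd1]
        cases rest with
        | nil =>
          rw [if_neg (by rintro ⟨-, h2⟩; simp only [List.length_nil] at hn'; push_cast at hn'; omega)]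
          rfl
        | cons r rs =>
          have hi : i < n - 1 := by simp only [List.length_cons] at hn'; push_cast at hn'; omega
          rw [List.dropLast_cons_of_ne_nil (pvDepths_ne_nil rs (d - 1))]
          by_cases hz : d - 1 = 0
          · rw [if_pos ⟨hz, hi⟩]
            simp only [List.all_cons]
            rw [show ((d - 1 : Int) != 0) = false from by simp; omega, Bool.false_and]
          · rw [if_neg (by rintro ⟨h1, -⟩; exact hz h1)]
            rw [ih (i + 1) n (d - 1) (by simp only [List.length_cons] at hn' ⊢; push_cast at hn' ⊢; omega) (by omega)]
            simp only [List.all_cons]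
            rw [show ((d - 1 : Int) != 0) = true from by simp; omega, Bool.true_and]
      · rw [pvGoA_other rest i n d hc hc2]
        rw [pvDepths_cons]
        have hv : pvValC c = 0 := by unfold pvValC; rw [if_neg hc, if_neg hc2]
        rw [hv, add_zero]
        cases rest with
        | nil => rfl
        | cons r rs =>
          rw [List.dropLast_cons_of_ne_nil (pvDepths_ne_nil rs d)]
          rw [ih (i + 1) n d (by simp only [List.length_cons] at hn' ⊢; push_cast at hn' ⊢; omega) hd]
          simp only [List.all_cons]
          rw [show ((d : Int) != 0) = true from by simp; omega, Bool.true_and]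

-- bridge 1: drop the final closing paren's entry from the depth table
theorem pvDepths_dropLast_append (xs : List Char) (c : Char) : ∀ (d : Int),
    (pvDepths (xs ++ [c]) d).dropLast = pvDepths xs d := by
  induction xs with
  | nil => intro d; simp [pvDepths]
  | cons x xs ih =>
    intro d
    rw [List.cons_append, pvDepths_cons, pvDepths_cons]
    have hne : pvDepths (xs ++ [c]) (d + pvValC x) ≠ [] := by
      cases h : xs ++ [c] with
      | nil => exact absurd h (by simp)
      | cons y ys => exact pvDepths_ne_nil ys _
    rw [List.dropLast_cons_of_ne_nil hne, ih]

-- bridge 2: depths-all-nonzero at offset 1 is prefix-nonnegativity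
theorem pvDepths_all_eq_nonneg : ∀ (mid : List Char) (d : Int), 0 ≤ d →
    (pvDepths mid (d + 1)).all (fun x => x != 0) = pvNonneg mid d := by
  intro mid
  induction mid with
  | nil => intro d _; rfl
  | cons c r ih =>
    intro d hd
    rw [pvDepths_cons]
    simp only [List.all_cons, pvNonneg]
    obtain ⟨hv1, hv2⟩ := pvValC_bounds c
    by_cases h : 0 ≤ d + pvValC c
    · rw [show (d + 1 + pvValC c != 0) = true from by simp; omega,
        show (decide (0 ≤ d + pvValC c)) = true from by simp [h],
        Bool.true_and, Bool.true_and,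
        show d + 1 + pvValC c = d + pvValC c + 1 from by ring,
        ih (d + pvValC c) h]
    · rw [show (d + 1 + pvValC c != 0) = false from by simp; omega,
        show (decide (0 ≤ d + pvValC c)) = false from by simp; omega,
        Bool.false_and, Bool.false_and]

-- bridge 3: non-paren characters do not affect prefix-nonnegativity
theorem pvNonneg_filter : ∀ (mid : List Char) (d : Int), 0 ≤ d →
    pvNonneg (mid.filter (fun c => c == '(' || c == ')')) d = pvNonneg mid d := by
  intro mid
  induction mid with
  | nil => intro d _; rfl
  | cons c r ih =>
    intro d hd
    rw [List.filter_cons]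
    by_cases hp : (c == '(' || c == ')') = true
    · rw [if_pos hp]
      rw [show pvNonneg (c :: List.filter (fun c => c == '(' || c == ')') r) d =
          (decide (0 ≤ d + pvValC c) &&
            pvNonneg (List.filter (fun c => c == '(' || c == ')') r) (d + pvValC c)) from rfl,
        show pvNonneg (c :: r) d =
          (decide (0 ≤ d + pvValC c) && pvNonneg r (d + pvValC c)) from rfl]
      by_cases h : 0 ≤ d + pvValC c
      · rw [ih (d + pvValC c) h]
      · rw [decide_eq_false h]
        simp
    · rw [if_neg hp]
      have hp' : ¬ c = '(' ∧ ¬ c = ')' := by simpa using hp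
      have hv : pvValC c = 0 := by unfold pvValC; rw [if_neg hp'.1, if_neg hp'.2]
      rw [show pvNonneg (c :: r) d =
          (decide (0 ≤ d + pvValC c) && pvNonneg r (d + pvValC c)) from rfl,
        hv, add_zero, decide_eq_true hd, Bool.true_and]
      exact ih d hd

-- ===== VERDICT (by name: the statement is the Claim_ definition above) =====
theorem is_parenthesized_expression_py_spec : Claim_equal_is_parenthesized_expression_py := by
  intro s _
  unfold Spec_is_parenthesized_expression_py is_parenthesized_expression_py is_parenthesized_expression_py_alt
  cases hg : PySem.Str.startswith s "(" && PySem.Str.endswith s ")" with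
  | false => simp
  | true =>
    simp only [Bool.not_true, Bool.false_eq_true, if_false]
    rw [Bool.and_eq_true] at hg
    obtain ⟨hs, he⟩ := hg
    rw [PySem.Str.startswith_eq, PySem.Chars.startswith_iff] at hs
    rw [PySem.Str.endswith_eq, PySem.Chars.endswith_iff] at he
    obtain ⟨rest, hrest⟩ : ∃ t, s.toList = '(' :: t := by
      obtain ⟨t, ht⟩ := hs; exact ⟨t, ht.symm⟩
    obtain ⟨pre, hpre⟩ := he
    obtain ⟨mid, hmid⟩ : ∃ mid, rest = mid ++ [')'] := by
      cases pre with
      | nil =>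
        exfalso
        rw [hrest] at hpre
        simp at hpre
      | cons p ps =>
        refine ⟨ps, ?_⟩
        rw [hrest, List.cons_append] at hpre
        have h2 : ps ++ ")".toList = rest := (List.cons.injEq _ _ _ _ ▸ hpre).2
        simpa using h2.symm
    subst hmid
    rw [hrest]
    have hslice : PySem.List.slice ('(' :: (mid ++ [')'])) (some 1) (some (-1)) = mid := by
      simp [PySem.List.slice]
    rw [hslice]
    -- A side to the depth table
    rw [pvGoA_open (mid ++ [')']) 0 (PySem.Str.len s) 0 rfl]
    have hlen : PySem.Str.len s = 0 + 1 + ((mid ++ [')']).length : Int) := by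
      rw [PySem.Str.len_eq, hrest]; push_cast [List.length_cons]; ring
    rw [pvGo_eq (mid ++ [')']) (0 + 1) (PySem.Str.len s) (0 + 1) (by rw [hlen]) (by omega)]
    rw [pvDepths_dropLast_append mid ')' (0 + 1)]
    rw [pvDepths_all_eq_nonneg mid 0 (le_refl 0)]
    rw [← pvNonneg_filter mid 0 (le_refl 0)]
    rw [pvReduce_spec (mid.filter (fun c => c == '(' || c == ')'))
      (fun c hc => by
        have := List.of_mem_filter hc
        simpa using this)]
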